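-- pv_equiv track=rewrite | github.com/Dutchthenomad/VECTRA-PLAYER | src/recording_ui/services/explorer_data.py | calculate_bet_windows
-- ===== SOURCE A (Python) =====
-- SIDEBET_WINDOW = 40  # Ticks covered by each bet
--
-- SIDEBET_COOLDOWN = 5  # Ticks to wait between bets
--
-- def calculate_bet_windows(entry_tick: int, num_bets: int = 4) -> list[dict]:
--     """
--     Calculate bet windows for a multi-bet strategy.
--
--     Args:
--         entry_tick: Tick to place first bet
--         num_bets: Number of consecutive bets (default 4)
--
--     Returns:
--         List of dicts with start/end ticks for each bet window
--     """
--     windows = []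
--     current_tick = entry_tick
--
--     for i in range(num_bets):
--         window = {
--             "bet_num": i + 1,
--             "start_tick": current_tick,
--             "end_tick": current_tick + SIDEBET_WINDOW - 1,  # Inclusive
--         }
--         windows.append(window)
--         # Next bet starts after window ends + cooldown
--         current_tick = current_tick + SIDEBET_WINDOW + SIDEBET_COOLDOWN
--
--     return windows
-- ===== SOURCE B (Python) =====
-- SIDEBET_WINDOW = 40  # Ticks covered by each bet
--
-- SIDEBET_COOLDOWN = 5  # Ticks to wait between bets
--
--
-- def calculate_bet_windows(entry_tick: int, num_bets: int = 4) -> list[dict]: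
--     """Closed-form: each window is derived independently from its index."""
--     stride = SIDEBET_WINDOW + SIDEBET_COOLDOWN
--     return [
--         {
--             "bet_num": i + 1,
--             "start_tick": entry_tick + i * stride,
--             "end_tick": entry_tick + i * stride + SIDEBET_WINDOW - 1,
--         }
--         for i in range(num_bets)
--     ]
-- ===== Notes on version B (the rewrite author's own statement) =====
-- stated objective: simpler
-- what changed: Replaced the loop that threads a mutable current_tick accumulator with a stateless list comprehension computing each window's start by the closed form entry_tick + i*(SIDEBET_WINDOW+SIDEBET_COOLDOWN).
import Mathlib
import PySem

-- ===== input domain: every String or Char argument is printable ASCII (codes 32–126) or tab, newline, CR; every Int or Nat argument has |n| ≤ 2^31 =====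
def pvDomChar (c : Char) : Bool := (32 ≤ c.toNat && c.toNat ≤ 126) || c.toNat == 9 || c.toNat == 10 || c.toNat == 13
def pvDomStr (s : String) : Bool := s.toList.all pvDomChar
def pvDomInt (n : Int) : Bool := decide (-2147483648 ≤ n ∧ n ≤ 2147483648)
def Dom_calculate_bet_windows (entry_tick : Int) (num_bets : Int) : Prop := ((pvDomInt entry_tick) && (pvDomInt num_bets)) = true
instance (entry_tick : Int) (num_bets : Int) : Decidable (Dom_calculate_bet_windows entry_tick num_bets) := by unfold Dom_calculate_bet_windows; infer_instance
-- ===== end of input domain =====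

-- B drops A's running current_tick accumulator: each window comes from a closed form in its index (objective: simpler).

def SIDEBET_WINDOW : Int := 40
def SIDEBET_COOLDOWN : Int := 5

-- ===== PORT A =====
-- loop with accumulator state (windows, current_tick)
def calculate_bet_windows (entry_tick : Int) (num_bets : Int) : List (List (String × Int)) :=
  ((PySem.List.pyRange 0 num_bets 1).foldl
    (fun (st : List (List (String × Int)) × Int) i =>
      (st.1 ++ [[("bet_num", i + 1), ("start_tick", st.2), ("end_tick", st.2 + SIDEBET_WINDOW - 1)]],
       st.2 + SIDEBET_WINDOW + SIDEBET_COOLDOWN))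
    ([], entry_tick)).1

-- ===== PORT B =====
-- stateless comprehension, closed form per index
def calculate_bet_windows_alt (entry_tick : Int) (num_bets : Int) : List (List (String × Int)) :=
  (PySem.List.pyRange 0 num_bets 1).map (fun i =>
    [("bet_num", i + 1),
     ("start_tick", entry_tick + i * (SIDEBET_WINDOW + SIDEBET_COOLDOWN)),
     ("end_tick", entry_tick + i * (SIDEBET_WINDOW + SIDEBET_COOLDOWN) + SIDEBET_WINDOW - 1)])

-- ===== PRECONDITION & SPEC =====
def Spec_calculate_bet_windows (entry_tick : Int) (num_bets : Int) (out : List (List (String × Int))) : Prop := out = calculate_bet_windows_alt entry_tick num_bets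
instance (entry_tick : Int) (num_bets : Int) (out : List (List (String × Int))) : Decidable (Spec_calculate_bet_windows entry_tick num_bets out) := by unfold Spec_calculate_bet_windows; infer_instance

-- ===== CLAIM (what is proved, stated in full; the proofs are below) =====
def Claim_equal_calculate_bet_windows : Prop := ∀ (entry_tick : Int) (num_bets : Int), Dom_calculate_bet_windows entry_tick num_bets → Spec_calculate_bet_windows entry_tick num_bets (calculate_bet_windows entry_tick num_bets)

-- ===== LEMMAS AND PROOFS =====
def pvWin (i t : Int) : List (String × Int) :=
  [("bet_num", i + 1), ("start_tick", t), ("end_tick", t + SIDEBET_WINDOW - 1)]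

theorem pv_fold_aux (m : Nat) : ∀ (acc : List (List (String × Int))) (t : Int),
    (((List.range m).map (fun (k : Nat) => (k : Int))).foldl
      (fun (st : List (List (String × Int)) × Int) i =>
        (st.1 ++ [pvWin i st.2], st.2 + SIDEBET_WINDOW + SIDEBET_COOLDOWN))
      (acc, t))
    = (acc ++ (List.range m).map (fun (k : Nat) =>
         pvWin (k : Int) (t + (k : Int) * (SIDEBET_WINDOW + SIDEBET_COOLDOWN))),
       t + m * (SIDEBET_WINDOW + SIDEBET_COOLDOWN)) := by
  induction m with
  | zero => intro acc t; simp
  | succ m ih =>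
    intro acc t
    rw [List.range_succ, List.map_append, List.foldl_append, ih acc t]
    simp only [List.map_cons, List.map_nil, List.foldl_cons, List.foldl_nil, List.map_append,
      List.append_assoc, Prod.mk.injEq]
    exact ⟨trivial, by push_cast; ring⟩

theorem calculate_bet_windows_spec : Claim_equal_calculate_bet_windows := by
  intro entry_tick num_bets _
  unfold Spec_calculate_bet_windows calculate_bet_windows calculate_bet_windows_alt
  rw [PySem.List.pyRange_one]
  simp only [sub_zero, zero_add]
  have h := pv_fold_aux (num_bets.toNat) [] entry_tick
  simp only [pvWin] at h
  rw [h]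
  simp [List.map_map, Function.comp_def]
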